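-- pv_equiv track=rewrite | github.com/sabdulmajid/RLM-jailbreak | rlm_experiment/rlm_runner.py | audit_root_prompt_isolation
-- ===== SOURCE A (Python) =====
-- from typing import Optional, List, Dict, Any, Callable
--
-- def audit_root_prompt_isolation(root_prompts: List[str], document: str) -> bool:
--     """
--     CRITICAL: Verify that the document text never appears in the INITIAL root prompts.
--     Returns True if isolation is maintained (no leak), False if document leaked.
--
--     Note: REPL outputs containing document snippets are expected and allowed.
--     We only check if the full document was passed to the root LM initially.
--     """
--     # Only check the first root prompt (before any REPL execution)
--     if not root_prompts:
--         return True
--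
--     first_prompt = root_prompts[0]
--
--     # Check if a significant chunk of the document appears in the first prompt
--     chunk_size = min(50, max(30, len(document) // 10))
--     step = max(1, chunk_size // 2)
--
--     if len(document) < 30:
--         return True
--
--     doc_chunks = [document[i:i+chunk_size] for i in range(0, len(document)-chunk_size+1, step)]
--
--     first_prompt_lower = first_prompt.lower()
--     for chunk in doc_chunks:
--         if chunk.lower() in first_prompt_lower:
--                 return False  # Document leaked into root prompt!
--
--     return True  # Root prompt is clean
-- ===== SOURCE B (Python) =====
-- def audit_root_prompt_isolation(root_prompts, document):
--     # Precompute the set of all chunk_size-length windows of the lowered first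
--     # prompt once; each document chunk is then a single set membership test
--     # instead of a substring search over the whole prompt.
--     if not root_prompts:
--         return True
--     n = len(document)
--     if n < 30:
--         return True
--     chunk_size = min(50, max(30, n // 10))
--     step = max(1, chunk_size // 2)
--     prompt_lower = root_prompts[0].lower()
--     doc_lower = document.lower()
--     windows = {prompt_lower[j:j + chunk_size]
--                for j in range(len(prompt_lower) - chunk_size + 1)}
--     for i in range(0, n - chunk_size + 1, step):
--         if doc_lower[i:i + chunk_size] in windows:
--             return False
--     return True
-- ===== Notes on version B (the rewrite author's own statement) =====
-- stated objective: alternative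
-- what changed: B lowercases the document once and precomputes the set of all chunk_size-length windows of the lowered first prompt, so each document chunk costs one set lookup instead of a substring search over the whole prompt.
import Mathlib
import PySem

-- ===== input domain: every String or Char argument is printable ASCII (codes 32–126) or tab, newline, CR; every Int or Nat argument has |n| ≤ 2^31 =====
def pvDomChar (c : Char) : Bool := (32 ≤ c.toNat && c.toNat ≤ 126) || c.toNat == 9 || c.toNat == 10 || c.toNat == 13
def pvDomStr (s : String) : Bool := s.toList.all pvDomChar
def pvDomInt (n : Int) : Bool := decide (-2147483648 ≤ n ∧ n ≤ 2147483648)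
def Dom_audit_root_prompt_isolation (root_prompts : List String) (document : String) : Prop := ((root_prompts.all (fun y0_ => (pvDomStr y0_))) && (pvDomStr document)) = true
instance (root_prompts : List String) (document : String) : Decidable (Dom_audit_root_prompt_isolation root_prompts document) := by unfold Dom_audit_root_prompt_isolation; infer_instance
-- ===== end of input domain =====

-- ===== PORT A =====
-- B precomputes the prompt's window set once instead of A's per-chunk substring search (same value; see claim).
def audit_root_prompt_isolation (root_prompts : List String) (document : String) : Bool :=
  match root_prompts with
  | [] => true
  | first_prompt :: _ =>
    let doc := document.toList
    let chunk_size : Nat := min 50 (max 30 (doc.length / 10))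
    let step : Nat := max 1 (chunk_size / 2)
    if doc.length < 30 then true
    else
      let doc_chunks := (PySem.List.pyRange 0 ((doc.length : Int) - chunk_size + 1) step).map
        (fun i => PySem.List.slice doc (some i) (some (i + chunk_size)))
      let first_prompt_lower := PySem.Chars.lower first_prompt.toList
      !(doc_chunks.any (fun chunk =>
          PySem.Chars.isIn (PySem.Chars.lower chunk) first_prompt_lower))

-- ===== PORT B =====
def audit_root_prompt_isolation_alt (root_prompts : List String) (document : String) : Bool :=
  match root_prompts with
  | [] => true
  | p :: _ =>
    let doc := document.toList
    let n := doc.length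
    if n < 30 then true
    else
      let chunk_size : Nat := min 50 (max 30 (n / 10))
      let step : Nat := max 1 (chunk_size / 2)
      let prompt_lower := PySem.Chars.lower p.toList
      let doc_lower := PySem.Chars.lower doc
      let windows : PySem.Set (List Char) := PySem.Set.ofList
        ((PySem.List.pyRange 0 ((prompt_lower.length : Int) - chunk_size + 1) 1).map
          (fun j => PySem.List.slice prompt_lower (some j) (some (j + chunk_size))))
      !((PySem.List.pyRange 0 ((n : Int) - chunk_size + 1) step).any
          (fun i => windows.contains (PySem.List.slice doc_lower (some i) (some (i + chunk_size)))))

-- ===== PRECONDITION & SPEC =====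
def Spec_audit_root_prompt_isolation (root_prompts : List String) (document : String) (out : Bool) : Prop := out = audit_root_prompt_isolation_alt root_prompts document
instance (root_prompts : List String) (document : String) (out : Bool) : Decidable (Spec_audit_root_prompt_isolation root_prompts document out) := by unfold Spec_audit_root_prompt_isolation; infer_instance

-- ===== CLAIM (what is proved, stated in full; the proofs are below) =====
def Claim_equal_audit_root_prompt_isolation : Prop := ∀ (root_prompts : List String) (document : String), Dom_audit_root_prompt_isolation root_prompts document → Spec_audit_root_prompt_isolation root_prompts document (audit_root_prompt_isolation root_prompts document)

-- ===== LEMMAS AND PROOFS =====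

-- membership in the window set of pl characterises substring containment, for c of the window length
theorem pv_windows_iff (pl c : List Char) (k : Nat) (hk : 0 < k) (hc : c.length = k) :
    (c ∈ (PySem.List.pyRange 0 ((pl.length : Int) - k + 1) 1).map
        (fun j => PySem.List.slice pl (some j) (some (j + (k : Int))))) ↔
      PySem.Chars.isIn c pl = true := by
  rw [← PySem.Chars.exists_prefix_drop_iff_isIn]
  constructor
  · rintro h
    rcases List.mem_map.1 h with ⟨j, hj, rfl⟩
    rcases (PySem.List.mem_pyRange_iff_of_pos (by norm_num) j).1 hj with ⟨hj0, hjlt, -⟩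
    refine ⟨j.toNat, ?_⟩
    rw [show (j : Int) = ((j.toNat : Nat) : Int) by omega, show ((j.toNat : Nat) : Int) + (k : Int) = (((j.toNat + k : Nat)) : Int) by push_cast; ring,
        PySem.List.slice_natCast, Nat.add_sub_cancel_left]
    exact List.take_prefix _ _
  · rintro ⟨j, hpre⟩
    have hlen : c.length ≤ (List.drop j pl).length := hpre.length_le
    simp only [List.length_drop, hc] at hlen
    refine List.mem_map.2 ⟨(j : Int), ?_, ?_⟩
    · refine (PySem.List.mem_pyRange_iff_of_pos (by norm_num) _).2 ⟨by positivity, by omega, by simp⟩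
    · rw [show ((j : Nat) : Int) + (k : Int) = (((j + k : Nat)) : Int) by push_cast; ring, PySem.List.slice_natCast]
      have := List.prefix_iff_eq_take.1 hpre
      rw [hc] at this
      rw [this]; congr 1; omega

theorem pv_any_congr {α : Type} (l : List α) (f g : α → Bool)
    (h : ∀ x ∈ l, f x = g x) : l.any f = l.any g := by
  induction l with
  | nil => rfl
  | cons a t ih => simp only [List.any_cons, h a (by simp), ih (fun x hx => h x (by simp [hx]))]

-- ===== VERDICT (by name: the statement is the Claim_ definition above) =====
theorem audit_root_prompt_isolation_spec : Claim_equal_audit_root_prompt_isolation := by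
  intro root_prompts document _
  unfold Spec_audit_root_prompt_isolation audit_root_prompt_isolation audit_root_prompt_isolation_alt
  cases root_prompts with
  | nil => rfl
  | cons p t =>
    show (if document.toList.length < 30 then true else _) = (if document.toList.length < 30 then true else _)
    by_cases h30 : document.toList.length < 30
    · rw [if_pos h30, if_pos h30]
    · rw [if_neg h30, if_neg h30]
      dsimp only
      rw [List.any_map]
      congr 1
      apply pv_any_congr
      intro i hi
      dsimp only [Function.comp]
      set N := document.toList.length with hN
      set K := min 50 (max 30 (N / 10)) with hKdef
      have hK30 : 30 ≤ K := by omega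
      have hKN : K ≤ N := by omega
      obtain ⟨hi0, hilt, -⟩ := (PySem.List.mem_pyRange_iff_of_pos
        (s := ((max 1 (K / 2) : Nat) : Int)) (by exact_mod_cast Nat.lt_of_lt_of_le Nat.zero_lt_one (Nat.le_max_left _ _)) i).1 hi
      obtain ⟨m, rfl⟩ : ∃ m : Nat, i = (m : Int) := ⟨i.toNat, by omega⟩
      have hmK : m + K ≤ N := by omega
      rw [show (m : Int) + (K : Int) = ((m + K : Nat) : Int) by push_cast; ring,
          PySem.List.slice_natCast, PySem.List.slice_natCast, Nat.add_sub_cancel_left]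
      have hcomm : PySem.Chars.lower (List.take K (List.drop m document.toList))
          = List.take K (List.drop m (PySem.Chars.lower document.toList)) := by
        simp [PySem.Chars.lower, List.map_take, List.map_drop]
      rw [← hcomm]
      have hlen : (PySem.Chars.lower (List.take K (List.drop m document.toList))).length = K := by
        simp only [PySem.Chars.lower, List.length_map, List.length_take, List.length_drop]
        omega
      have hw := pv_windows_iff (PySem.Chars.lower p.toList)
        (PySem.Chars.lower (List.take K (List.drop m document.toList))) K (by omega) hlen
      rw [Bool.eq_iff_iff, PySem.Set.contains_iff, PySem.Set.mem_ofList]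
      exact hw.symm
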